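-- pv_equiv track=rewrite | github.com/19834029747/DreamSchool_ | 1.subseq_min.py | SubSeq_MinI
-- ===== SOURCE A (Python) =====
-- def SubSeq_MinI(source, target):
--     s_count = 0   # 初始化子序列的计数
--     t_index = 0   # 初始化目标字符串的索引
--
--     while t_index < len(target):
--         c_index = t_index   # 当前目标索引
--
--         # source每个字符
--         for char in source:
--             # 字符与目标字符匹配
--             if t_index < len(target) and char == target[t_index]:
--                 t_index += 1
--
--         # 没有匹配任务
--         if c_index == t_index:
--             return -1
--         s_count += 1     # 增加子序列的计数
--
--     return s_count
-- ===== SOURCE B (Python) =====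
-- def SubSeq_MinI(source, target):
--     count = 0
--     pos = len(source)   # force a new copy of source before the first match
--     for ch in target:
--         i = source.find(ch, pos)
--         if i == -1:
--             i = source.find(ch)
--             if i == -1:
--                 return -1
--             count += 1
--         pos = i + 1
--     return count
-- ===== Notes on version B (the rewrite author's own statement) =====
-- stated objective: faster
-- what changed: A re-scans the whole source string once per concatenated copy, advancing a target index; B scans the target once, jumping a position pointer with source.find(ch, pos) and wrapping (count += 1) only when the char has no occurrence at or after pos.
import Mathlib
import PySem

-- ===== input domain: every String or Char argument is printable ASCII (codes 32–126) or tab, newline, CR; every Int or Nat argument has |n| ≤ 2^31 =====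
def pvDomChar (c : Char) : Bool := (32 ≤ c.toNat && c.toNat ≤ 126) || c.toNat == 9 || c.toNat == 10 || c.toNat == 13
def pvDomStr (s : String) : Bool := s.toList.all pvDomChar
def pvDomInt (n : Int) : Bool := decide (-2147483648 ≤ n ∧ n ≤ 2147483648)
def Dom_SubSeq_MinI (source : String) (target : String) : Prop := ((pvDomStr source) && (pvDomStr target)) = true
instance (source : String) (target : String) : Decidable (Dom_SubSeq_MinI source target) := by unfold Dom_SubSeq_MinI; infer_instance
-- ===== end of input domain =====

-- B replaces A's per-copy rescans of source by jumping with source.find(ch, pos) while scanning target once.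

-- ===== PORT A =====
-- the inner `for char in source` pass: advances t_index greedily
def pvPassA (s : List Char) (t : List Char) (ti : Int) : Int :=
  s.foldl (fun ti c =>
    if ti < (t.length : Int) ∧ PySem.List.pyGet? t ti = some c then ti + 1 else ti) ti

-- the `while t_index < len(target)` loop; fuel = |target|+1 always suffices
-- (t_index strictly increases each non-returning iteration), so the fuel-out
-- branch is unreachable.
def pvWhileA (s : List Char) (t : List Char) : Nat → Int → Int → Int
  | 0, s_count, _ => s_count
  | fuel + 1, s_count, ti =>
    if ti < (t.length : Int) then
      let ti' := pvPassA s t ti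
      if ti = ti' then -1 else pvWhileA s t fuel (s_count + 1) ti'
    else s_count

def SubSeq_MinI (source : String) (target : String) : Int :=
  pvWhileA source.toList target.toList (target.toList.length + 1) 0 0

-- ===== PORT B =====
-- the `for ch in target` loop of Source B, state (pos, count)
def pvGoB (source : String) : List Char → Int → Int → Int
  | [], _, count => count
  | ch :: rest, pos, count =>
    let i := PySem.Str.findFrom source (String.singleton ch) pos none
    if i = -1 then
      let i := PySem.Str.find source (String.singleton ch)
      if i = -1 then -1
      else pvGoB source rest (i + 1) (count + 1)
    else pvGoB source rest (i + 1) count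

def SubSeq_MinI_alt (source : String) (target : String) : Int :=
  pvGoB source target.toList (PySem.Str.len source) 0

-- ===== PRECONDITION & SPEC =====
def Spec_SubSeq_MinI (source : String) (target : String) (out : Int) : Prop := out = SubSeq_MinI_alt source target
instance (source : String) (target : String) (out : Int) : Decidable (Spec_SubSeq_MinI source target out) := by unfold Spec_SubSeq_MinI; infer_instance

-- ===== CLAIM (what is proved, stated in full; the proofs are below) =====
def Claim_equal_SubSeq_MinI : Prop := ∀ (source : String) (target : String), Dom_SubSeq_MinI source target → Spec_SubSeq_MinI source target (SubSeq_MinI source target)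

-- ===== LEMMAS AND PROOFS =====

-- list-level greedy pass: remaining target after one scan of s
def pvApass : List Char → List Char → List Char
  | [], r => r
  | _ :: s, [] => pvApass s []
  | c :: s, x :: r => if c = x then pvApass s r else pvApass s (x :: r)

-- first index of x in l
def pvFfind : List Char → Char → Option Nat
  | [], _ => none
  | c :: l, x => if c = x then some 0 else (pvFfind l x).map (· + 1)

-- list-level B loop over a suffix of S
def pvBlist (S : List Char) : List Char → List Char → Int → Int
  | [], _, count => count
  | x :: rem, suf, count =>
    match pvFfind suf x with
    | some k => pvBlist S rem (suf.drop (k + 1)) count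
    | none =>
      match pvFfind S x with
      | none => -1
      | some k => pvBlist S rem (S.drop (k + 1)) (count + 1)

theorem pvApass_nil_right (s : List Char) : pvApass s [] = [] := by
  induction s with
  | nil => rfl
  | cons c s ih => simpa [pvApass] using ih

theorem pvApass_suffix (s r : List Char) : pvApass s r <:+ r := by
  induction s generalizing r with
  | nil => exact List.suffix_refl r
  | cons c s ih =>
    cases r with
    | nil => simp [pvApass_nil_right]
    | cons x r =>
      by_cases h : c = x
      · simp only [pvApass, h]
        exact (ih r).trans (List.suffix_cons x r)
      · simpa [pvApass, h] using ih (x :: r)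

theorem pvApass_not_mem {x : Char} {s : List Char} (h : x ∉ s) (r : List Char) :
    pvApass s (x :: r) = x :: r := by
  induction s with
  | nil => rfl
  | cons c s ih =>
    have hcx : c ≠ x := fun hc => h (hc ▸ List.mem_cons_self)
    have : x ∉ s := fun hm => h (List.mem_cons_of_mem _ hm)
    simpa [pvApass, hcx] using ih this

theorem pvApass_mem_lt {x : Char} {s : List Char} (h : x ∈ s) (r : List Char) :
    (pvApass s (x :: r)).length < (x :: r).length := by
  induction s with
  | nil => cases h
  | cons c s ih =>
    by_cases hcx : c = x
    · subst hcx
      have := (pvApass_suffix s r).length_le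
      simp only [pvApass, List.length_cons, reduceIte]
      omega
    · have hxs : x ∈ s := by
        rcases List.mem_cons.mp h with h1 | h1
        · exact absurd h1.symm hcx
        · exact h1
      simpa [pvApass, hcx] using ih hxs

-- pvFfind facts
theorem pvFfind_eq_none_iff (l : List Char) (x : Char) : pvFfind l x = none ↔ x ∉ l := by
  induction l with
  | nil => simp [pvFfind]
  | cons c l ih =>
    by_cases h : c = x
    · simp [pvFfind, h]
    · simp [pvFfind, h, ih, Option.map_eq_none_iff]
      tauto

theorem pvFfind_spec {l : List Char} {x : Char} {k : Nat} (h : pvFfind l x = some k) :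
    k < l.length ∧ l[k]? = some x ∧ ∀ i, i < k → l[i]? ≠ some x := by
  induction l generalizing k with
  | nil => simp [pvFfind] at h
  | cons c l ih =>
    by_cases hcx : c = x
    · subst hcx
      simp only [pvFfind, reduceIte, Option.some.injEq] at h
      subst h
      refine ⟨by simp, by simp, by omega⟩
    · simp only [pvFfind, if_neg hcx, Option.map_eq_some_iff] at h
      obtain ⟨k', hk', rfl⟩ := h
      obtain ⟨h1, h2, h3⟩ := ih hk'
      refine ⟨by simpa using h1, by simpa using h2, ?_⟩
      intro i hi
      cases i with
      | zero => simpa using fun hc => hcx hc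
      | succ i => simpa using h3 i (by omega)

theorem pvFfind_drop_apass {suf : List Char} {x : Char} {k : Nat}
    (h : pvFfind suf x = some k) (r : List Char) :
    pvApass suf (x :: r) = pvApass (suf.drop (k + 1)) r := by
  induction suf generalizing k with
  | nil => simp [pvFfind] at h
  | cons c s ih =>
    by_cases hcx : c = x
    · subst hcx
      simp only [pvFfind, reduceIte, Option.some.injEq] at h
      subst h; simp [pvApass]
    · simp only [pvFfind, if_neg hcx, Option.map_eq_some_iff] at h
      obtain ⟨k', hk', rfl⟩ := h
      simpa [pvApass, hcx] using ih hk' 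

-- singleton prefix/infix characterizations
theorem singleton_prefix_iff (x : Char) (l : List Char) : [x] <+: l ↔ l.head? = some x := by
  cases l with
  | nil => simp
  | cons y ys => simp [List.cons_prefix_cons, eq_comm]

theorem singleton_infix_iff (x : Char) (l : List Char) : [x] <:+: l ↔ x ∈ l := by
  constructor
  · rintro ⟨s, t, rfl⟩; simp
  · intro h
    obtain ⟨s, t, rfl⟩ := List.append_of_mem h
    exact ⟨s, t, by simp⟩

theorem singleton_prefix_drop (l : List Char) (m : Nat) (x : Char) :
    [x] <+: l.drop m ↔ l[m]? = some x := by
  rw [singleton_prefix_iff, List.head?_drop]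

-- PySem find on a single-char needle = pvFfind
theorem find_singleton (l : List Char) (x : Char) :
    PySem.Chars.find l [x] =
      match pvFfind l x with
      | none => -1
      | some j => (j : Int) := by
  rcases h : pvFfind l x with _ | j
  · have hx : x ∉ l := (pvFfind_eq_none_iff l x).mp h
    have : ¬ [x] <:+: l := by rw [singleton_infix_iff]; exact hx
    simpa using (PySem.Chars.find_eq_neg_one_iff l [x]).mpr this
  · obtain ⟨hjl, hjx, hjmin⟩ := pvFfind_spec h
    have hmem : x ∈ l := by
      have := List.getElem?_eq_some_iff.mp hjx
      exact this.choose_spec ▸ List.getElem_mem _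
    have hinf : [x] <:+: l := (singleton_infix_iff x l).mpr hmem
    have hnn : 0 ≤ PySem.Chars.find l [x] := (PySem.Chars.find_nonneg_iff l [x]).mpr hinf
    obtain ⟨hpre, hmin⟩ := PySem.Chars.find_spec hnn
    have hfx : l[(PySem.Chars.find l [x]).toNat]? = some x :=
      (singleton_prefix_drop l _ x).mp hpre
    have hje : j = (PySem.Chars.find l [x]).toNat := by
      rcases Nat.lt_trichotomy j (PySem.Chars.find l [x]).toNat with hlt | heq | hgt
      · exact absurd ((singleton_prefix_drop l j x).mpr hjx) (hmin j hlt)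
      · exact heq
      · exact absurd hfx (hjmin _ hgt)
    simp [hje, Int.toNat_of_nonneg hnn]

-- PySem findFrom on a single-char needle = pvFfind on the dropped suffix
theorem findFrom_singleton (S : List Char) (x : Char) (k : Nat) (hk : k ≤ S.length) :
    PySem.Chars.findFrom S [x] (k : Int) none =
      match pvFfind (S.drop k) x with
      | none => -1
      | some j => ((k + j : Nat) : Int) := by
  rw [PySem.Chars.findFrom_natCast S [x] k hk, find_singleton]
  rcases h : pvFfind (S.drop k) x with _ | j
  · simp
  · have hne : ((j : Nat) : Int) ≠ -1 := by omega
    simp only [hne, if_false]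
    push_cast
    ring

theorem findFrom_singleton_none {S : List Char} {x : Char} {k : Nat} (hk : k ≤ S.length)
    (h : pvFfind (S.drop k) x = none) : PySem.Chars.findFrom S [x] (k : Int) none = -1 := by
  rw [findFrom_singleton S x k hk, h]

theorem findFrom_singleton_some {S : List Char} {x : Char} {k j : Nat} (hk : k ≤ S.length)
    (h : pvFfind (S.drop k) x = some j) :
    PySem.Chars.findFrom S [x] (k : Int) none = ((k + j : Nat) : Int) := by
  rw [findFrom_singleton S x k hk, h]

theorem find_singleton_none {l : List Char} {x : Char} (h : pvFfind l x = none) :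
    PySem.Chars.find l [x] = -1 := by
  rw [find_singleton l x, h]

theorem find_singleton_some {l : List Char} {x : Char} {j : Nat} (h : pvFfind l x = some j) :
    PySem.Chars.find l [x] = (j : Int) := by
  rw [find_singleton l x, h]

-- master unfolding lemma: pvBlist over any suffix, via the greedy pass
theorem pvBlist_eq (S : List Char) (rem : List Char) :
    ∀ suf count,
      pvBlist S rem suf count =
        (match pvApass suf rem with
         | [] => count
         | x :: r2 => if x ∈ S then pvBlist S (x :: r2) S (count + 1) else -1) := by
  induction rem with
  | nil => intro suf count; simp [pvBlist, pvApass_nil_right]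
  | cons x rem ih =>
    intro suf count
    rcases h : pvFfind suf x with _ | k
    · -- x ∉ suf
      have hx : x ∉ suf := (pvFfind_eq_none_iff suf x).mp h
      rw [pvApass_not_mem hx]
      by_cases hxS : x ∈ S
      · have hS : ∃ k, pvFfind S x = some k := by
          rcases hf : pvFfind S x with _ | k
          · exact absurd ((pvFfind_eq_none_iff S x).mp hf) (by simpa using hxS)
          · exact ⟨k, rfl⟩
        obtain ⟨k, hk⟩ := hS
        simp [pvBlist, h, hk, hxS]
      · have hf : pvFfind S x = none := (pvFfind_eq_none_iff S x).mpr hxS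
        simp [pvBlist, h, hf, hxS]
    · rw [pvFfind_drop_apass h]
      simpa [pvBlist, h] using ih (suf.drop (k + 1)) count

-- pass bridge: the indexed foldl pass equals the list-level greedy pass
theorem pvPassA_bridge (s : List Char) (t : List Char) :
    ∀ i : Nat, i ≤ t.length →
      ∃ j : Nat, i ≤ j ∧ j ≤ t.length ∧ pvPassA s t (i : Int) = (j : Int) ∧
        t.drop j = pvApass s (t.drop i) := by
  induction s with
  | nil => intro i hi; exact ⟨i, le_refl i, hi, rfl, rfl⟩
  | cons c s ih =>
    intro i hi
    have hstep : pvPassA (c :: s) t (i : Int) =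
        pvPassA s t (if (i : Int) < (t.length : Int) ∧ PySem.List.pyGet? t (i : Int) = some c
          then (i : Int) + 1 else (i : Int)) := rfl
    by_cases hil : i < t.length
    · have hdrop : t.drop i = t[i] :: t.drop (i + 1) := List.drop_eq_getElem_cons hil
      have hget : PySem.List.pyGet? t (i : Int) = some t[i] := by
        simp [PySem.List.pyGet?_natCast, List.getElem?_eq_getElem hil]
      by_cases hc : c = t[i]
      · have hcond : ((i : Int) < (t.length : Int) ∧ PySem.List.pyGet? t (i : Int) = some c) := by
          exact ⟨by exact_mod_cast hil, by rw [hget, hc]⟩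
        rw [hstep, if_pos hcond]
        have : ((i : Int) + 1) = ((i + 1 : Nat) : Int) := by push_cast; ring
        rw [this]
        obtain ⟨j, h1, h2, h3, h4⟩ := ih (i + 1) (by omega)
        refine ⟨j, by omega, h2, h3, ?_⟩
        rw [h4, hdrop, pvApass, if_pos hc]
      · have hcond : ¬ ((i : Int) < (t.length : Int) ∧ PySem.List.pyGet? t (i : Int) = some c) := by
          rintro ⟨-, h⟩
          rw [hget] at h
          exact hc (Option.some.inj h).symm
        rw [hstep, if_neg hcond]
        obtain ⟨j, h1, h2, h3, h4⟩ := ih i hi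
        refine ⟨j, h1, h2, h3, ?_⟩
        rw [h4, hdrop, pvApass, if_neg hc, ← hdrop]
    · have hieq : i = t.length := by omega
      have hcond : ¬ ((i : Int) < (t.length : Int) ∧ PySem.List.pyGet? t (i : Int) = some c) := by
        rintro ⟨h, -⟩; omega
      rw [hstep, if_neg hcond]
      obtain ⟨j, h1, h2, h3, h4⟩ := ih i hi
      refine ⟨j, h1, h2, h3, ?_⟩
      rw [h4, hieq, List.drop_length]
      rfl

-- B bridge: the positional port equals the list-level loop
theorem pvGoB_bridge (source : String) (rem : List Char) :
    ∀ (p : Nat) count, p ≤ source.toList.length →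
      pvGoB source rem (p : Int) count = pvBlist source.toList rem (source.toList.drop p) count := by
  induction rem with
  | nil => intro p count _; rfl
  | cons ch rest ih =>
    intro p count hp
    simp only [pvGoB, PySem.Str.findFrom_eq, PySem.Str.find_eq, String.toList_singleton]
    rcases h : pvFfind (source.toList.drop p) ch with _ | k
    · -- not found after pos: wrap to a fresh copy
      rw [findFrom_singleton_none hp h, if_pos rfl]
      rcases hS : pvFfind source.toList ch with _ | k
      · rw [find_singleton_none hS, if_pos rfl]
        simp [pvBlist, h, hS]
      · have hk : k < source.toList.length := (pvFfind_spec hS).1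
        rw [find_singleton_some hS, if_neg (by omega)]
        have hcast : (k : Int) + 1 = ((k + 1 : Nat) : Int) := by push_cast; ring
        rw [hcast, ih (k + 1) (count + 1) (by omega)]
        simp [pvBlist, h, hS]
    · -- found at p + k
      have hk : k < (source.toList.drop p).length := (pvFfind_spec h).1
      rw [List.length_drop] at hk
      rw [findFrom_singleton_some hp h, if_neg (by omega)]
      have hcast : ((p + k : Nat) : Int) + 1 = ((p + k + 1 : Nat) : Int) := by push_cast; ring
      rw [hcast, ih (p + k + 1) count (by omega)]
      simp only [pvBlist, h, List.drop_drop]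
      rw [show p + (k + 1) = p + k + 1 by omega]

-- A bridge: the fueled while loop
theorem pvWhileA_bridge (source : String) (t : List Char) :
    ∀ fuel (i : Nat) count, i ≤ t.length → t.length - i < fuel →
      pvWhileA source.toList t fuel count (i : Int) =
        (match t.drop i with
         | [] => count
         | x :: r => if x ∈ source.toList then pvBlist source.toList (x :: r) source.toList (count + 1) else -1) := by
  intro fuel
  induction fuel with
  | zero =>
    intro i count hi hfuel
    have : i = t.length := by omega
    subst this
    simp [pvWhileA, List.drop_length]
  | succ fuel ih =>
    intro i count hi hfuel
    by_cases hil : i < t.length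
    · have hdrop : t.drop i = t[i] :: t.drop (i + 1) := List.drop_eq_getElem_cons hil
      obtain ⟨j, h1, h2, h3, h4⟩ := pvPassA_bridge source.toList t i hi
      have hcond : ((i : Int) < (t.length : Int)) := by exact_mod_cast hil
      by_cases hij : i = j
      · -- no progress: head of remaining target not in source
        have heq : pvApass source.toList (t.drop i) = t.drop i := by rw [← h4, hij]
        have hnotmem : t[i] ∉ source.toList := by
          intro hmem
          have := pvApass_mem_lt hmem (t.drop (i + 1))
          rw [← hdrop, heq, hdrop] at this
          omega
        subst hij
        simp only [pvWhileA, if_pos hcond, h3, reduceIte, hdrop]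
        rw [if_neg hnotmem]
      · have hlt : i < j := by omega
        have hprog : t[i] ∈ source.toList := by
          by_contra hnm
          have := pvApass_not_mem hnm (t.drop (i + 1))
          rw [← hdrop] at this
          rw [this] at h4
          have := congrArg List.length h4
          simp at this
          omega
        have hne : ¬ ((i : Int) = (j : Int)) := by omega
        simp only [pvWhileA, if_pos hcond, h3, if_neg hne]
        rw [ih j (count + 1) h2 (by omega)]
        have hred : (match t[i] :: t.drop (i + 1) with
            | [] => count
            | x :: r => if x ∈ source.toList then pvBlist source.toList (x :: r) source.toList (count + 1) else -1)
            = if t[i] ∈ source.toList then pvBlist source.toList (t[i] :: t.drop (i + 1)) source.toList (count + 1) else -1 := rfl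
        rw [hdrop, hred, if_pos hprog, pvBlist_eq, ← hdrop, ← h4]
    · have hieq : i = t.length := by omega
      have hcond : ¬ ((i : Int) < (t.length : Int)) := by omega
      simp [pvWhileA, hieq, List.drop_length]

-- ===== VERDICT (by name: the statement is the Claim_ definition above) =====
theorem SubSeq_MinI_spec : Claim_equal_SubSeq_MinI := by
  intro source target _
  unfold Spec_SubSeq_MinI SubSeq_MinI SubSeq_MinI_alt
  have hlen : PySem.Str.len source = ((source.toList.length : Nat) : Int) := by
    simp [PySem.Str.len_eq]
  rw [hlen, pvGoB_bridge source target.toList source.toList.length 0 (le_refl _)]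
  rw [List.drop_length]
  have h0 : (0 : Int) = ((0 : Nat) : Int) := rfl
  rw [h0, pvWhileA_bridge source target.toList (target.toList.length + 1) 0 ((0 : Nat) : Int) (by omega) (by omega)]
  rw [List.drop_zero]
  rw [pvBlist_eq]
  cases target.toList with
  | nil => rfl
  | cons x r => simp [pvApass]
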